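-- pv_equiv track=rewrite | github.com/Vyacheslav314/bot | parser.py | today
-- ===== SOURCE A (Python) =====
-- def today(data):
--     weather_today_str = 'Сегодня '
--     for i in range(len(data)):
--         if data[i] != '0':
--             weather_today_str += data[i] + ' '
--         else:
--             break
--     return weather_today_str
-- ===== SOURCE B (Python) =====
-- def today(data):
--     try:
--         cut = data.index('0')
--     except ValueError:
--         cut = len(data)
--     return 'Сегодня ' + ''.join(x + ' ' for x in data[:cut])
-- ===== Notes on version B (the rewrite author's own statement) =====
-- stated objective: simpler
-- what changed: B first locates the cutoff with list.index('0') (falling back to len(data)), then builds the string in one join over the prefix slice, instead of A's interleaved test-and-append loop with break.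
import Mathlib
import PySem

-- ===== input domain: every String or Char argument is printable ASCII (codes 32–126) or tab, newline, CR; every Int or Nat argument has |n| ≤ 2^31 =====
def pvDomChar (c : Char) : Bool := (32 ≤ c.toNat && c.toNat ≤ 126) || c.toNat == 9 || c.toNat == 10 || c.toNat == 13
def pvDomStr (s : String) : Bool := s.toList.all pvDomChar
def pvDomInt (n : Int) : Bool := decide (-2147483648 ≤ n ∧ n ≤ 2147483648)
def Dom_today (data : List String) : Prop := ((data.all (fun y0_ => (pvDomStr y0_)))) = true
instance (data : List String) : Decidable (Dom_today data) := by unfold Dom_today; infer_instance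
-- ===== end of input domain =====

-- B separates boundary-finding (index of '0', defaulting to len) from string-building (one join over the prefix slice); objective: simpler.


-- ===== PORT A =====
-- the for-loop with break, carried as structural recursion over the list with the string accumulator
def todayGo : List String → String → String
  | [], acc => acc
  | x :: xs, acc => if x ≠ "0" then todayGo xs (acc ++ (x ++ " ")) else acc

def today (data : List String) : String := todayGo data "Сегодня "

-- ===== PORT B =====
-- cut = data.index('0') with ValueError falling back to len(data); then ''.join(x + ' ' for x in data[:cut])
def today_alt (data : List String) : String :=
  let cut : Nat := (PySem.List.index? data "0").getD data.length
  "Сегодня " ++ PySem.Str.join "" ((PySem.List.slice data none (some (cut : Int))).map (fun x => x ++ " "))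

-- ===== PRECONDITION & SPEC =====
def Spec_today (data : List String) (out : String) : Prop := out = today_alt data
instance (data : List String) (out : String) : Decidable (Spec_today data out) := by unfold Spec_today; infer_instance

-- ===== CLAIM (what is proved, stated in full; the proofs are below) =====
def Claim_equal_today : Prop := ∀ (data : List String), Dom_today data → Spec_today data (today data)

-- ===== LEMMAS AND PROOFS =====
theorem intercalate_nil_sep (l : List (List Char)) : List.intercalate [] l = l.flatten := by
  simp [List.intercalate]
  induction l with
  | nil => simp
  | cons a t ih => cases t <;> simp_all [List.intersperse]

theorem join_empty_cons (s : String) (l : List String) :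
    PySem.Str.join "" (s :: l) = s ++ PySem.Str.join "" l := by
  rw [← String.toList_inj]
  simp [PySem.Str.join, PySem.Chars.join, intercalate_nil_sep]

theorem join_empty_nil : PySem.Str.join "" ([] : List String) = "" := by
  rw [← String.toList_inj]
  simp [PySem.Str.join, PySem.Chars.join, intercalate_nil_sep]

theorem todayGo_spec (l : List String) (acc : String) :
    todayGo l acc =
      acc ++ PySem.Str.join ""
        ((l.take ((PySem.List.index? l "0").getD l.length)).map (fun x => x ++ " ")) := by
  induction l generalizing acc with
  | nil => simp [todayGo, join_empty_nil]
  | cons x xs ih =>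
    by_cases hx : x = "0"
    · subst hx
      rw [PySem.List.index?_cons_self]
      simp [todayGo, join_empty_nil]
    · rw [todayGo, if_pos hx, ih, PySem.List.index?_cons_of_ne xs hx]
      have hgetD : ((PySem.List.index? xs "0").map (· + 1)).getD (xs.length + 1)
          = (PySem.List.index? xs "0").getD xs.length + 1 := by
        cases PySem.List.index? xs "0" <;> rfl
      rw [List.length_cons, hgetD, List.take_succ_cons, List.map_cons, join_empty_cons,
        String.append_assoc]

theorem today_spec : Claim_equal_today := by
  intro data _
  unfold Spec_today today
  rw [todayGo_spec]
  have : PySem.List.slice data none (some (((PySem.List.index? data "0").getD data.length : Nat) : Int))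
      = data.take ((PySem.List.index? data "0").getD data.length) :=
    PySem.List.slice_to_natCast data _
  simp only [today_alt, this]
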